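-- pv_equiv track=rewrite | github.com/PeterStanding/Refreshing_Coding | Python/Meta_Questions/UniformIntegers.py | uniformInts
-- ===== SOURCE A (Python) =====
-- def uniformInts(A,B):
--     curr = ""
--     total = 0
--     for x in range(A,B+1):
--          curr = str(x)
--          if curr.count(curr[0]) == len(curr):
--              total += 1
--     return total
-- ===== SOURCE B (Python) =====
-- def uniformInts(A, B):
--     # Enumerate the uniform ("repdigit") integers directly instead of scanning [A, B].
--     total = 1 if A <= 0 <= B else 0
--     rep = 1  # repunit: 1, 11, 111, ...
--     while rep <= B:
--         for d in range(1, 10):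
--             n = d * rep
--             if A <= n <= B:
--                 total += 1
--         rep = 10 * rep + 1
--     return total
-- ===== Notes on version B (the rewrite author's own statement) =====
-- stated objective: faster
-- what changed: Instead of scanning every integer in [A,B] and string-testing each for identical digits, B directly enumerates the repdigit numbers d*(repunit) per digit length (plus 0) and counts those inside [A,B].
import Mathlib
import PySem

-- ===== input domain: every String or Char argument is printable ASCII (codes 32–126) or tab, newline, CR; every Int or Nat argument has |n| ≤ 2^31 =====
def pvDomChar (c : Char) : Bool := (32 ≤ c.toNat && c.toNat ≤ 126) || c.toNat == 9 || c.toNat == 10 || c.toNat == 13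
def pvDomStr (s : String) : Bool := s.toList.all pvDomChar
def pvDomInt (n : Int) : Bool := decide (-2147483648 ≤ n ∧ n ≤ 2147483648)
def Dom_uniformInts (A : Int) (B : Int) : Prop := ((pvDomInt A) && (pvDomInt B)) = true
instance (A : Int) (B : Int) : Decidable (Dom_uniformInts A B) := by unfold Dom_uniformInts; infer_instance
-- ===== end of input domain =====

-- B replaces A's scan of every integer in [A,B] (string-testing each) by direct
-- enumeration of the repdigit numbers d·(1…1), an asymptotically faster algorithm.

-- ===== PORT A =====
-- Python's `curr.count(curr[0]) == len(curr)` for curr = str(x); the `none` branch is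
-- unreachable (str(x) is never empty, so curr[0] cannot raise).
def pvUniTest (x : Int) : Bool :=
  match PySem.List.pyGet? (PySem.Int.toChars x) 0 with
  | some c =>
      (PySem.Chars.count (PySem.Int.toChars x) [c] : Int)
        == PySem.List.len (PySem.Int.toChars x)
  | none => false

def uniformInts (A : Int) (B : Int) : Int :=
  (PySem.List.pyRange A (B + 1)).foldl
    (fun total x => if pvUniTest x then total + 1 else total) 0

-- ===== PORT B =====
-- inner `for d in range(1, 10)` of Source B
def pvCountDigits (lo hi rep : Int) : Int :=
  (PySem.List.pyRange 1 10).foldl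
    (fun total d => if lo ≤ d * rep ∧ d * rep ≤ hi then total + 1 else total) 0

-- `while rep <= B` of Source B; the extra `1 ≤ rep` conjunct is a totality guard only
-- (every call keeps rep in 1, 11, 111, …, so it is always true).
def pvRepLoop (lo hi rep : Int) : Int :=
  if h : rep ≤ hi ∧ 1 ≤ rep then
    pvCountDigits lo hi rep + pvRepLoop lo hi (10 * rep + 1)
  else 0
termination_by (hi + 1 - rep).toNat
decreasing_by omega

def uniformInts_alt (A : Int) (B : Int) : Int :=
  (if A ≤ 0 ∧ 0 ≤ B then 1 else 0) + pvRepLoop A B 1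

-- ===== PRECONDITION & SPEC =====
def Spec_uniformInts (A : Int) (B : Int) (out : Int) : Prop := out = uniformInts_alt A B
instance (A : Int) (B : Int) (out : Int) : Decidable (Spec_uniformInts A B out) := by unfold Spec_uniformInts; infer_instance

-- ===== CLAIM (what is proved, stated in full; the proofs are below) =====
def Claim_equal_uniformInts : Prop := ∀ (A : Int) (B : Int), Dom_uniformInts A B → Spec_uniformInts A B (uniformInts A B)

-- ===== LEMMAS AND PROOFS =====

-- repunits 0, 1, 11, 111, … as Nat and Int
def pvRepN : Nat → Nat
  | 0 => 0
  | k + 1 => 10 * pvRepN k + 1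

def pvRep (k : Nat) : Int := (pvRepN k : Int)

theorem pvRep_succ (k : Nat) : pvRep (k + 1) = 10 * pvRep k + 1 := by
  simp [pvRep, pvRepN]

theorem pvRepN_pos (k : Nat) : 1 ≤ pvRepN (k + 1) := by
  simp [pvRepN]

theorem pvRepN_mono : ∀ {j k : Nat}, j ≤ k → pvRepN j ≤ pvRepN k := by
  intro j k h
  induction k with
  | zero => have : j = 0 := by omega
            simp [this]
  | succ k ih =>
    rcases Nat.lt_or_ge j (k + 1) with h' | h'
    · have h1 := ih (by omega)
      have h2 : pvRepN (k + 1) = 10 * pvRepN k + 1 := rfl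
      omega
    · have hjk : j = k + 1 := by omega
      simp [hjk]

-- characterisation of the uniform (repdigit) positive naturals
def pvIsRep (n : Nat) : Prop := ∃ d L, 1 ≤ d ∧ d ≤ 9 ∧ n = d * pvRepN (L + 1)

theorem count_go_singleton (c : Char) :
    ∀ (fuel : Nat) (l : List Char) (acc : Nat), l.length ≤ fuel →
      PySem.Chars.count.go [c] fuel l acc = acc + l.count c := by
  intro fuel
  induction fuel with
  | zero =>
    intro l acc hlen
    cases l with
    | nil => simp [PySem.Chars.count.go]
    | cons h t => simp at hlen
  | succ f ih =>
    intro l acc hlen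
    cases l with
    | nil => simp [PySem.Chars.count.go]
    | cons h t =>
      have hlen' : t.length ≤ f := by simpa using hlen
      by_cases hc : c = h
      · subst hc
        simp [PySem.Chars.count.go, List.isPrefixOf, ih t (acc + 1) hlen',
          List.count_cons]
        omega
      · simp [PySem.Chars.count.go, List.isPrefixOf, hc, ih t acc hlen',
          List.count_cons, Ne.symm hc]

theorem count_singleton (l : List Char) (c : Char) :
    PySem.Chars.count l [c] = l.count c := by
  have h := count_go_singleton c l.length l 0 (le_refl _)
  simpa [PySem.Chars.count] using h

theorem toDigitsCore_eq :
    ∀ (fuel n : Nat) (acc : List Char), 0 < n → n ≤ fuel →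
      Nat.toDigitsCore 10 fuel n acc
        = ((Nat.digits 10 n).map Nat.digitChar).reverse ++ acc := by
  intro fuel
  induction fuel with
  | zero => intro n acc hn hf; omega
  | succ f ih =>
    intro n acc hn hf
    by_cases h10 : n / 10 = 0
    · have hlt : n < 10 := by omega
      have hd : Nat.digits 10 n = [n % 10] := by
        rw [Nat.digits_def' (by norm_num) hn, h10]
        simp
      simp [Nat.toDigitsCore, h10, hd]
    · have hq : 0 < n / 10 := Nat.pos_of_ne_zero h10
      have hq' : n / 10 ≤ f := by omega
      have hd : Nat.digits 10 n = n % 10 :: Nat.digits 10 (n / 10) :=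
        Nat.digits_def' (by norm_num) hn
      simp only [Nat.toDigitsCore, h10, if_false]
      rw [ih (n / 10) ((n % 10).digitChar :: acc) hq hq', hd]
      simp

theorem toDigits_eq (n : Nat) (hn : 0 < n) :
    Nat.toDigits 10 n = ((Nat.digits 10 n).map Nat.digitChar).reverse := by
  have h := toDigitsCore_eq (n + 1) n [] hn (by omega)
  simpa [Nat.toDigits] using h

theorem digitChar_inj {a b : Nat} (ha : a < 10) (hb : b < 10)
    (h : Nat.digitChar a = Nat.digitChar b) : a = b := by
  interval_cases a <;> interval_cases b <;> revert h <;> decide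

theorem digitChar_ne_dash {d : Nat} (hd : d < 10) : Nat.digitChar d ≠ '-' := by
  interval_cases d <;> decide

theorem ofDigits_replicate (d : Nat) :
    ∀ L, Nat.ofDigits 10 (List.replicate L d) = d * pvRepN L := by
  intro L
  induction L with
  | zero => simp [pvRepN, Nat.ofDigits]
  | succ L ih =>
    rw [List.replicate_succ, Nat.ofDigits_cons, ih]
    show (d : ℕ) + 10 * (d * pvRepN L) = d * pvRepN (L + 1)
    simp [pvRepN]; ring

theorem digits_repdigit (d : Nat) (hd1 : 1 ≤ d) (hd9 : d ≤ 9) :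
    ∀ L, Nat.digits 10 (d * pvRepN (L + 1)) = List.replicate (L + 1) d := by
  intro L
  induction L with
  | zero =>
    have h1 : d * pvRepN 1 = d := by simp [pvRepN]
    rw [h1, Nat.digits_def' (b := 10) (by norm_num) (by omega)]
    have : d % 10 = d := by omega
    have h2 : d / 10 = 0 := by omega
    simp [this, h2]
  | succ L ih =>
    have hrep : pvRepN (L + 2) = 10 * pvRepN (L + 1) + 1 := rfl
    have hval : d * pvRepN (L + 2) = 10 * (d * pvRepN (L + 1)) + d := by
      rw [hrep]; ring
    have hpos : 0 < d * pvRepN (L + 2) := by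
      have := pvRepN_pos (L + 1)
      exact Nat.mul_pos (by omega) (by omega)
    rw [Nat.digits_def' (b := 10) (by norm_num) hpos]
    have hmod : (d * pvRepN (L + 2)) % 10 = d := by omega
    have hdiv : (d * pvRepN (L + 2)) / 10 = d * pvRepN (L + 1) := by omega
    rw [hmod, hdiv, ih]
    rfl

-- the A-side string test recognises exactly 0 and the positive repdigits
theorem uniTest_iff (x : Int) :
    pvUniTest x = true ↔ (x = 0 ∨ (0 < x ∧ pvIsRep x.toNat)) := by
  rcases lt_trichotomy x 0 with hx | hx | hx
  · -- negative: '-' followed by digits, never uniform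
    have hne : x.natAbs ≠ 0 := by omega
    have hds : Nat.digits 10 x.natAbs ≠ [] := Nat.digits_ne_nil_iff_ne_zero.mpr hne
    have htd : Nat.toDigits 10 x.natAbs
        = ((Nat.digits 10 x.natAbs).map Nat.digitChar).reverse := toDigits_eq _ (by omega)
    have hchars : PySem.Int.toChars x = '-' :: Nat.toDigits 10 x.natAbs := by
      simp [PySem.Int.toChars, hx]
    constructor
    · intro h
      exfalso
      unfold pvUniTest at h
      rw [hchars] at h
      simp only [PySem.List.pyGet?_zero_cons, count_singleton, PySem.List.len_eq,
        beq_iff_eq, Int.natCast_inj] at h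
      have hall := List.count_eq_length.mp h
      obtain ⟨a, ha⟩ := List.exists_mem_of_ne_nil _ hds
      have hmem : Nat.digitChar a ∈ '-' :: Nat.toDigits 10 x.natAbs := by
        rw [htd]
        exact List.mem_cons_of_mem _ (List.mem_reverse.mpr (List.mem_map_of_mem ha))
      have := hall _ hmem
      exact digitChar_ne_dash (Nat.digits_lt_base (by norm_num) ha) this.symm
    · intro h
      rcases h with h | ⟨h, _⟩ <;> omega
  · simp [hx]
    decide
  · have hn : 0 < x.toNat := by omega
    have htd : Nat.toDigits 10 x.toNat
        = ((Nat.digits 10 x.toNat).map Nat.digitChar).reverse := toDigits_eq _ hn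
    have hds : Nat.digits 10 x.toNat ≠ [] := Nat.digits_ne_nil_iff_ne_zero.mpr (by omega)
    have hxneg : ¬ x < 0 := by omega
    have hchars : PySem.Int.toChars x = ((Nat.digits 10 x.toNat).map Nat.digitChar).reverse := by
      unfold PySem.Int.toChars
      rw [if_neg hxneg, htd]
    have hlne : ((Nat.digits 10 x.toNat).map Nat.digitChar).reverse ≠ [] := by
      simp [hds]
    obtain ⟨c, t, hl⟩ := List.exists_cons_of_ne_nil hlne
    have hcmem : c ∈ ((Nat.digits 10 x.toNat).map Nat.digitChar).reverse := by
      rw [hl]; exact List.mem_cons_self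
    constructor
    · intro h
      unfold pvUniTest at h
      rw [hchars, hl] at h
      simp only [PySem.List.pyGet?_zero_cons, count_singleton, PySem.List.len_eq,
        beq_iff_eq, Int.natCast_inj] at h
      have hall : ∀ b ∈ c :: t, c = b := List.count_eq_length.mp h
      -- all digits are equal
      have halld : ∀ a ∈ Nat.digits 10 x.toNat, ∀ b ∈ Nat.digits 10 x.toNat, a = b := by
        intro a ha b hb
        have hac : Nat.digitChar a = c := by
          have : Nat.digitChar a ∈ c :: t := by
            rw [← hl, List.mem_reverse]
            exact List.mem_map_of_mem ha
          exact (hall _ this).symm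
        have hbc : Nat.digitChar b = c := by
          have : Nat.digitChar b ∈ c :: t := by
            rw [← hl, List.mem_reverse]
            exact List.mem_map_of_mem hb
          exact (hall _ this).symm
        exact digitChar_inj (Nat.digits_lt_base (by norm_num) ha)
          (Nat.digits_lt_base (by norm_num) hb) (hac.trans hbc.symm)
      set ds := Nat.digits 10 x.toNat with hds'
      have hlast : ds.getLast hds ∈ ds := List.getLast_mem hds
      set d := ds.getLast hds with hdd
      have hrep : ds = List.replicate ds.length d :=
        List.eq_replicate_of_mem (fun b hb => halld b hb d hlast)
      have hd0 : d ≠ 0 := Nat.getLast_digit_ne_zero 10 (by omega)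
      have hd9 : d < 10 := Nat.digits_lt_base (by norm_num) hlast
      have hLpos : 0 < ds.length := List.length_pos_iff.mpr hds
      have hn' : x.toNat = d * pvRepN ds.length := by
        have := Nat.ofDigits_digits 10 x.toNat
        rw [← hds'] at this
        rw [← this, hrep, ofDigits_replicate]
        rw [← hrep]
      refine Or.inr ⟨hx, d, ds.length - 1, by omega, by omega, ?_⟩
      rw [hn']
      have hL : ds.length - 1 + 1 = ds.length := by omega
      rw [hL]
    · rintro (h | ⟨-, d, L, hd1, hd9, hn'⟩)
      · omega
      · have hdig : Nat.digits 10 x.toNat = List.replicate (L + 1) d := by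
          rw [hn']; exact digits_repdigit d hd1 hd9 L
        unfold pvUniTest
        rw [hchars, hdig]
        simp only [List.map_replicate, List.reverse_replicate, List.replicate_succ,
          PySem.List.pyGet?_zero_cons]
        simp only [count_singleton, PySem.List.len_eq, beq_iff_eq, Int.natCast_inj,
          ← List.replicate_succ]
        simp [List.count_replicate]

theorem countP_split {α : Type} (p q : α → Bool) :
    ∀ (l : List α),
      l.countP p = l.countP (fun a => p a && q a) + l.countP (fun a => p a && !q a) := by
  intro l
  induction l with
  | nil => simp
  | cons x xs ih =>
    by_cases hp : p x <;> by_cases hq : q x <;>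
      simp [List.countP_cons, hp, hq, ih] <;> omega

-- inner loop is a countP
theorem countDigits_eq (lo hi rep : Int) :
    pvCountDigits lo hi rep
      = ((PySem.List.pyRange 1 10).countP
          (fun d => decide (lo ≤ d * rep ∧ d * rep ≤ hi)) : Int) := by
  unfold pvCountDigits
  rw [PySem.List.foldl_ite_add_one (fun d => lo ≤ d * rep ∧ d * rep ≤ hi)]
  simp

theorem pvRep_nonneg (k : Nat) : 0 ≤ pvRep k := by
  simp [pvRep]

theorem pvRep_pos {k : Nat} (hk : 1 ≤ k) : 1 ≤ pvRep k := by
  obtain ⟨k', rfl⟩ : ∃ k', k = k' + 1 := ⟨k - 1, by omega⟩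
  have := pvRepN_pos k'
  simp [pvRep]; omega

theorem pvRep_mono {j k : Nat} (h : j ≤ k) : pvRep j ≤ pvRep k := by
  have := pvRepN_mono h
  simp [pvRep]; omega

theorem mul_rep_lt {d : Int} (hd : d ≤ 9) (m : Nat) : d * pvRep m < pvRep (m + 1) := by
  have h0 := pvRep_nonneg m
  have h1 : d * pvRep m ≤ 9 * pvRep m := by nlinarith
  rw [pvRep_succ]
  nlinarith

theorem rep_le_mul {d : Int} (hd : 1 ≤ d) (m : Nat) : pvRep m ≤ d * pvRep m := by
  have h0 := pvRep_nonneg m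
  nlinarith

-- one repunit band of [lo,hi] is counted by the digit loop
theorem band_count (lo hi : Int) (k : Nat) (hk : 1 ≤ k) :
    ((PySem.List.pyRange lo (hi + 1)).countP
        (fun x => pvUniTest x && !(x == 0) && decide (pvRep k ≤ x) && !decide (pvRep (k + 1) ≤ x)))
      = ((PySem.List.pyRange 1 10).countP
          (fun d => decide (lo ≤ d * pvRep k ∧ d * pvRep k ≤ hi))) := by
  rw [List.countP_eq_length_filter, List.countP_eq_length_filter]
  set P : Int → Bool := fun x =>
    pvUniTest x && !(x == 0) && decide (pvRep k ≤ x) && !decide (pvRep (k + 1) ≤ x) with hP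
  set Q : Int → Bool := fun d => decide (lo ≤ d * pvRep k ∧ d * pvRep k ≤ hi) with hQ
  set N := (PySem.List.pyRange lo (hi + 1)).filter P with hN
  set M := ((PySem.List.pyRange 1 10).filter Q).map (· * pvRep k) with hM
  have hrk : (1 : Int) ≤ pvRep k := pvRep_pos hk
  have hNnd : N.Nodup := (PySem.List.nodup_pyRange_one _ _).filter _
  have hMnd : M.Nodup := by
    refine ((PySem.List.nodup_pyRange_one _ _).filter _).map ?_
    exact fun a b hab => by
      have : a * pvRep k = b * pvRep k := hab
      exact mul_right_cancel₀ (by omega) this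
  have hmem : ∀ x, x ∈ N ↔ x ∈ M := by
    intro x
    constructor
    · intro hx
      rw [hN, List.mem_filter] at hx
      obtain ⟨hxR, hxP⟩ := hx
      rw [PySem.List.mem_pyRange_one] at hxR
      rw [hP] at hxP
      simp only [Bool.and_eq_true, Bool.not_eq_true', beq_eq_false_iff_ne,
        decide_eq_true_eq, decide_eq_false_iff_not] at hxP
      obtain ⟨⟨⟨hu, hx0⟩, hgek⟩, hltk1⟩ := hxP
      rcases (uniTest_iff x).mp hu with rfl | ⟨hxpos, d, L, hd1, hd9, hxval⟩
      · exact absurd rfl hx0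
      · have hxeq : x = (d : Int) * pvRep (L + 1) := by
          have : x = (x.toNat : Int) := by omega
          rw [this, hxval]
          push_cast [pvRep]
          ring
        have hLk : L + 1 = k := by
          by_contra hne
          rcases Nat.lt_or_ge (L + 1) k with hlt | hge
          · have h1 : pvRep (L + 2) ≤ pvRep k := pvRep_mono (by omega)
            have h2 : (d : Int) * pvRep (L + 1) < pvRep (L + 2) :=
              mul_rep_lt (by exact_mod_cast hd9) _
            omega
          · have hk1 : k + 1 ≤ L + 1 := by omega
            have h1 : pvRep (k + 1) ≤ pvRep (L + 1) := pvRep_mono hk1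
            have h2 : pvRep (L + 1) ≤ (d : Int) * pvRep (L + 1) :=
              rep_le_mul (by exact_mod_cast hd1) _
            omega
        rw [hM, List.mem_map]
        refine ⟨(d : Int), ?_, ?_⟩
        · rw [List.mem_filter, PySem.List.mem_pyRange_one, hQ]
          have hx' : (d : Int) * pvRep k = x := by rw [hxeq, hLk]
          constructor
          · constructor <;> [exact_mod_cast (by omega : (1:Int) ≤ (d:Int));
              exact_mod_cast (by omega : (d:Int) < 10)]
          · simp only [decide_eq_true_eq]
            rw [hx']
            omega
        · rw [hxeq, hLk]
    · intro hx
      rw [hM, List.mem_map] at hx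
      obtain ⟨d, hd, rfl⟩ := hx
      rw [List.mem_filter, PySem.List.mem_pyRange_one, hQ] at hd
      obtain ⟨⟨hd1, hd10⟩, hdq⟩ := hd
      simp only [decide_eq_true_eq] at hdq
      rw [hN, List.mem_filter]
      constructor
      · rw [PySem.List.mem_pyRange_one]
        omega
      · rw [hP]
        have hxpos : 0 < d * pvRep k := by nlinarith
        have hxnat : (d * pvRep k).toNat = d.toNat * pvRepN k := by
          have hcast : d * pvRep k = ((d.toNat * pvRepN k : Nat) : Int) := by
            push_cast [pvRep]
            rw [Int.toNat_of_nonneg (by omega)]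
          omega
        have hu : pvUniTest (d * pvRep k) = true := by
          rw [uniTest_iff]
          refine Or.inr ⟨hxpos, d.toNat, k - 1, by omega, by omega, ?_⟩
          have hk' : k - 1 + 1 = k := by omega
          rw [hk', hxnat]
        simp only [Bool.and_eq_true, Bool.not_eq_true', beq_eq_false_iff_ne,
          decide_eq_true_eq, decide_eq_false_iff_not]
        refine ⟨⟨⟨hu, by omega⟩, rep_le_mul hd1 k⟩, ?_⟩
        have := mul_rep_lt (d := d) (by omega) k
        omega
  have hperm : N.Perm M := (List.perm_ext_iff_of_nodup hNnd hMnd).mpr hmem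
  rw [hperm.length_eq, hM, List.length_map]

theorem repLoop_eq (m : Nat) :
    ∀ (k : Nat) (lo hi : Int), 1 ≤ k → (hi + 1 - pvRep k).toNat ≤ m →
      pvRepLoop lo hi (pvRep k)
        = ((PySem.List.pyRange lo (hi + 1)).countP
            (fun x => pvUniTest x && !(x == 0) && decide (pvRep k ≤ x)) : Int) := by
  induction m with
  | zero =>
    intro k lo hi hk hm
    have hrk := pvRep_pos hk
    have hguard : ¬ (pvRep k ≤ hi ∧ 1 ≤ pvRep k) := by omega
    rw [pvRepLoop, dif_neg hguard]
    have hz : (PySem.List.pyRange lo (hi + 1)).countP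
        (fun x => pvUniTest x && !(x == 0) && decide (pvRep k ≤ x)) = 0 := by
      rw [List.countP_eq_zero]
      intro x hx
      rw [PySem.List.mem_pyRange_one] at hx
      simp only [Bool.and_eq_true, decide_eq_true_eq, not_and]
      intro _
      omega
    rw [hz]
    simp
  | succ m ih =>
    intro k lo hi hk hm
    have hrk := pvRep_pos hk
    by_cases hle : pvRep k ≤ hi
    · rw [pvRepLoop, dif_pos ⟨hle, by omega⟩]
      have hsucc := pvRep_succ k
      have hm' : (hi + 1 - pvRep (k + 1)).toNat ≤ m := by omega
      rw [show (10 : Int) * pvRep k + 1 = pvRep (k + 1) from hsucc.symm]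
      rw [ih (k + 1) lo hi (by omega) hm', countDigits_eq]
      have hsplit := countP_split
        (p := fun x => pvUniTest x && !(x == 0) && decide (pvRep k ≤ x))
        (q := fun x => decide (pvRep (k + 1) ≤ x))
        (PySem.List.pyRange lo (hi + 1))
      have h1 : (PySem.List.pyRange lo (hi + 1)).countP
          (fun x => (pvUniTest x && !(x == 0) && decide (pvRep k ≤ x))
            && decide (pvRep (k + 1) ≤ x))
          = (PySem.List.pyRange lo (hi + 1)).countP
            (fun x => pvUniTest x && !(x == 0) && decide (pvRep (k + 1) ≤ x)) := by
        apply List.countP_congr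
        intro x _
        have hmono : pvRep k ≤ pvRep (k + 1) := pvRep_mono (by omega)
        simp only [Bool.and_eq_true, decide_eq_true_eq]
        constructor
        · rintro ⟨⟨⟨hu, hne⟩, _⟩, hge⟩; exact ⟨⟨hu, hne⟩, hge⟩
        · rintro ⟨⟨hu, hne⟩, hge⟩; exact ⟨⟨⟨hu, hne⟩, by omega⟩, hge⟩
      have h2 := band_count lo hi k hk
      omega
    · have hguard : ¬ (pvRep k ≤ hi ∧ 1 ≤ pvRep k) := by omega
      rw [pvRepLoop, dif_neg hguard]
      have hz : (PySem.List.pyRange lo (hi + 1)).countP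
          (fun x => pvUniTest x && !(x == 0) && decide (pvRep k ≤ x)) = 0 := by
        rw [List.countP_eq_zero]
        intro x hx
        rw [PySem.List.mem_pyRange_one] at hx
        simp only [Bool.and_eq_true, decide_eq_true_eq, not_and]
        intro _
        omega
      rw [hz]
      simp

-- ===== VERDICT (by name: the statement is the Claim_ definition above) =====
theorem pvRep_one : pvRep 1 = 1 := by
  simp [pvRep, pvRepN]

theorem uniformInts_spec : Claim_equal_uniformInts := by
  unfold Claim_equal_uniformInts
  intro A B _
  unfold Spec_uniformInts uniformInts uniformInts_alt
  rw [PySem.List.foldl_if_add_one pvUniTest]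
  have hsplit : (PySem.List.pyRange A (B + 1)).countP pvUniTest
      = (PySem.List.pyRange A (B + 1)).countP (fun x => pvUniTest x && (x == 0))
        + (PySem.List.pyRange A (B + 1)).countP (fun x => pvUniTest x && !(x == 0)) :=
    countP_split pvUniTest (fun x => x == 0) _
  have h1 : (PySem.List.pyRange A (B + 1)).countP (fun x => pvUniTest x && (x == 0))
      = (if A ≤ 0 ∧ 0 ≤ B then 1 else 0) := by
    have hc : (PySem.List.pyRange A (B + 1)).countP (fun x => pvUniTest x && (x == 0))
        = (PySem.List.pyRange A (B + 1)).countP (fun x => x == 0) := by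
      apply List.countP_congr
      intro x _
      simp only [Bool.and_eq_true, beq_iff_eq]
      constructor
      · rintro ⟨-, h⟩; exact h
      · rintro rfl; exact ⟨by decide, rfl⟩
    rw [hc]
    have hcount : (PySem.List.pyRange A (B + 1)).countP (fun x => x == 0)
        = (PySem.List.pyRange A (B + 1)).count 0 := by
      simp [List.count]
    rw [hcount]
    by_cases hmem : (0 : Int) ∈ PySem.List.pyRange A (B + 1)
    · rw [List.count_eq_one_of_mem (PySem.List.nodup_pyRange_one _ _) hmem]
      rw [PySem.List.mem_pyRange_one] at hmem
      rw [if_pos (by omega)]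
    · rw [List.count_eq_zero_of_not_mem hmem]
      rw [PySem.List.mem_pyRange_one] at hmem
      rw [if_neg (by omega)]
  have h2 : (PySem.List.pyRange A (B + 1)).countP (fun x => pvUniTest x && !(x == 0))
      = (PySem.List.pyRange A (B + 1)).countP
          (fun x => pvUniTest x && !(x == 0) && decide (pvRep 1 ≤ x)) := by
    apply List.countP_congr
    intro x _
    simp only [Bool.and_eq_true, Bool.not_eq_true', beq_eq_false_iff_ne,
      decide_eq_true_eq, pvRep_one]
    constructor
    · rintro ⟨hu, hne⟩
      rcases (uniTest_iff x).mp hu with rfl | ⟨hpos, -⟩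
      · exact absurd rfl hne
      · exact ⟨⟨hu, hne⟩, by omega⟩
    · rintro ⟨⟨hu, hne⟩, -⟩; exact ⟨hu, hne⟩
  have h3 : pvRepLoop A B 1
      = ((PySem.List.pyRange A (B + 1)).countP
          (fun x => pvUniTest x && !(x == 0) && decide (pvRep 1 ≤ x)) : Int) := by
    rw [← pvRep_one]
    exact repLoop_eq (B + 1 - pvRep 1).toNat 1 A B (by omega) (by omega)
  rw [h3, hsplit, h1, h2]
  split_ifs <;> simp <;> omega
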